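-- pv_equiv track=rewrite | github.com/guerillacodester/vehicle_simulator | world/vehicle_store.py | select_vehicle
-- ===== SOURCE A (Python) =====
-- from typing import Dict, Any
--
-- def select_vehicle(vehicles: Dict[str, Dict[str, Any]]) -> str:
--     defaults = [vid for vid, cfg in vehicles.items() if cfg.get("default") is True]
--     if defaults:
--         return sorted(defaults)[0]
--     actives = [vid for vid, cfg in vehicles.items() if cfg.get("active") is True]
--     if actives:
--         return sorted(actives)[0]
--     vids = list(vehicles.keys())
--     if len(vids) == 1:
--         return vids[0]
--     return sorted(vids)[0]
-- ===== SOURCE B (Python) =====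
-- def select_vehicle(vehicles):
--     best_default = best_active = best_any = None
--     for vid, cfg in vehicles.items():
--         if cfg.get("default") is True and (best_default is None or vid < best_default):
--             best_default = vid
--         if cfg.get("active") is True and (best_active is None or vid < best_active):
--             best_active = vid
--         if best_any is None or vid < best_any:
--             best_any = vid
--     if best_default is not None:
--         return best_default
--     if best_active is not None:
--         return best_active
--     return best_any
-- ===== Notes on version B (the rewrite author's own statement) =====
-- stated objective: alternative
-- what changed: Replaces A's three list comprehensions plus sorting with a single pass over the dict maintaining three running smallest-id accumulators (default/active/any).
-- outside the precondition, e.g. on select_vehicle({}): A raises IndexError, B returns None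
import Mathlib
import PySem

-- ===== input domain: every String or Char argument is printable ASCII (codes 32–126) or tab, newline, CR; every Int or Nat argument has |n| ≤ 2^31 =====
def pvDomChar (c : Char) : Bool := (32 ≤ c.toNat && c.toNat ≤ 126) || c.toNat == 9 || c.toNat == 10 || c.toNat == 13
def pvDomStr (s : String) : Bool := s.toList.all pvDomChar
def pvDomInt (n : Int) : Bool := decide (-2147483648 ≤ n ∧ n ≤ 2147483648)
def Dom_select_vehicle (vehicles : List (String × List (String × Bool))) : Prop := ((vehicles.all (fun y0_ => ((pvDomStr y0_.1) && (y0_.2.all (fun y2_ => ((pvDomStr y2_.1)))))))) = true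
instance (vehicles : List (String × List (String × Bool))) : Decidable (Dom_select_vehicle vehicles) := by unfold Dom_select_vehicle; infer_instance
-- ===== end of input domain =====

-- B replaces A's filter-then-sort passes by one fold keeping three running smallest-id accumulators (alternative decomposition, same results).


-- ===== PORT A =====
def select_vehicle (vehicles : List (String × List (String × Bool))) : String :=
  let defaults := vehicles.filterMap (fun p => if (PySem.Dict.mk p.2).get? "default" == some true then some p.1 else none)
  if !defaults.isEmpty then (PySem.List.sorted defaults (fun y => y) false).headD ""
  else
    let actives := vehicles.filterMap (fun p => if (PySem.Dict.mk p.2).get? "active" == some true then some p.1 else none)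
    if !actives.isEmpty then (PySem.List.sorted actives (fun y => y) false).headD ""
    else
      let vids := vehicles.map (·.1)
      if vids.length == 1 then vids.headD ""
      else (PySem.List.sorted vids (fun y => y) false).headD ""

-- ===== PORT B =====
-- one-element update of a running-smallest accumulator (Python: `if cond and (best is None or vid < best): best = vid`)
def pvUpd (cond : Bool) (vid : String) (best : Option String) : Option String :=
  if cond && (match best with | none => true | some b => decide (vid < b)) then some vid else best

def select_vehicle_alt (vehicles : List (String × List (String × Bool))) : String :=
  let st := vehicles.foldl
    (fun (st : Option String × Option String × Option String) p =>
      (pvUpd ((PySem.Dict.mk p.2).get? "default" == some true) p.1 st.1,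
       pvUpd ((PySem.Dict.mk p.2).get? "active" == some true) p.1 st.2.1,
       pvUpd true p.1 st.2.2))
    (none, none, none)
  match st.1 with
  | some v => v
  | none =>
    match st.2.1 with
    | some v => v
    | none => st.2.2.getD ""

-- ===== PRECONDITION & SPEC =====
-- Pre_ excludes the empty dict, on which A raises IndexError (sorted([])[0]).
def Pre_select_vehicle (vehicles : List (String × List (String × Bool))) : Prop := vehicles ≠ []
instance (vehicles : List (String × List (String × Bool))) : Decidable (Pre_select_vehicle vehicles) := by unfold Pre_select_vehicle; infer_instance
def pvWitness_select_vehicle : (List (String × List (String × Bool))) := [("bus", [("active", true)])]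
def Spec_select_vehicle (vehicles : List (String × List (String × Bool))) (out : String) : Prop := out = select_vehicle_alt vehicles
instance (vehicles : List (String × List (String × Bool))) (out : String) : Decidable (Spec_select_vehicle vehicles out) := by unfold Spec_select_vehicle; infer_instance

-- ===== CLAIM (what is proved, stated in full; the proofs are below) =====
def Claim_equal_select_vehicle : Prop := ∀ (vehicles : List (String × List (String × Bool))), Dom_select_vehicle vehicles → Pre_select_vehicle vehicles → Spec_select_vehicle vehicles (select_vehicle vehicles)

-- ===== LEMMAS AND PROOFS =====

-- value of a running minimum of a nonempty list, as an Option
def pvMval : List String → Option String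
  | [] => none
  | x :: t => some (t.foldl min x)

def pvComb : Option String → Option String → Option String
  | none, o => o
  | some b, none => some b
  | some b, some v => some (min b v)

theorem pvUpd_eq_comb (cond : Bool) (vid : String) (best : Option String) :
    pvUpd cond vid best = if cond then pvComb best (some vid) else best := by
  cases best with
  | none => cases cond <;> simp [pvUpd, pvComb]
  | some b =>
    cases cond with
    | false => simp [pvUpd]
    | true =>
      by_cases h : vid < b
      · have hm : min b vid = vid := min_eq_right (le_of_lt h)
        simp [pvUpd, pvComb, h, hm]
      · have hm : min b vid = b := min_eq_left (not_lt.mp h)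
        simp [pvUpd, pvComb, h, hm]

theorem pvComb_assoc (a b c : Option String) : pvComb (pvComb a b) c = pvComb a (pvComb b c) := by
  cases a <;> cases b <;> cases c <;> simp [pvComb, min_assoc]

theorem foldl_min_min (s : List String) : ∀ (x y : String), s.foldl min (min x y) = min x (s.foldl min y) := by
  induction s with
  | nil => intro x y; simp
  | cons z s ih =>
    intro x y
    simp only [List.foldl_cons, min_assoc]
    exact ih x (min y z)

theorem pvMval_cons (x : String) (t : List String) : pvMval (x :: t) = pvComb (some x) (pvMval t) := by
  cases t with
  | nil => simp [pvMval, pvComb]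
  | cons y s => simp [pvMval, pvComb, List.foldl_cons, foldl_min_min]

theorem foldl_upd_eq (f : (String × List (String × Bool)) → Bool) :
    ∀ (l : List (String × List (String × Bool))) (acc : Option String),
      l.foldl (fun a p => pvUpd (f p) p.1 a) acc
        = pvComb acc (pvMval (l.filterMap (fun p => if f p then some p.1 else none))) := by
  intro l
  induction l with
  | nil => intro acc; cases acc <;> simp [pvMval, pvComb]
  | cons p l ih =>
    intro acc
    rw [List.foldl_cons, ih, pvUpd_eq_comb, List.filterMap_cons]
    by_cases h : f p
    · simp only [h, if_pos, pvMval_cons, pvComb_assoc]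
    · simp [h]

theorem foldl_step3 (d ac : (String × List (String × Bool)) → Bool) :
    ∀ (l : List (String × List (String × Bool))) (a b c : Option String),
      l.foldl (fun (st : Option String × Option String × Option String) p =>
          (pvUpd (d p) p.1 st.1, pvUpd (ac p) p.1 st.2.1, pvUpd true p.1 st.2.2)) (a, b, c)
        = (l.foldl (fun acc p => pvUpd (d p) p.1 acc) a,
           l.foldl (fun acc p => pvUpd (ac p) p.1 acc) b,
           l.foldl (fun acc p => pvUpd true p.1 acc) c) := by
  intro l
  induction l with
  | nil => intro a b c; rfl
  | cons p l ih => intro a b c; simp only [List.foldl_cons, ih]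

theorem head_sorted_eq_foldl_min (x : String) (t : List String) :
    (PySem.List.sorted (x :: t) (fun y => y) false).head?.getD "" = t.foldl min x := by
  have hne : PySem.List.sorted (x :: t) (fun y => y) false ≠ [] := by
    simp [PySem.List.sorted_eq_nil_iff]
  obtain ⟨m, r, hs⟩ := List.exists_cons_of_ne_nil hne
  have hm_mem : m ∈ (x :: t) := by
    have : m ∈ PySem.List.sorted (x :: t) (fun y => y) false := by simp [hs]
    exact (PySem.List.mem_sorted _ _ _ _).mp this
  have hmin : PySem.List.min? (x :: t) (fun y => y) = some (t.foldl min x) :=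
    PySem.List.min?_id_cons x t
  have hf_mem : t.foldl min x ∈ (x :: t) := PySem.List.min?_mem hmin
  have h1 : m ≤ t.foldl min x := PySem.List.key_head_sorted_le _ _ hs _ hf_mem
  have h2 : t.foldl min x ≤ m := PySem.List.min?_isMin hmin _ hm_mem
  rw [hs]
  simpa using le_antisymm h1 h2

-- ===== VERDICT (by name: the statement is the Claim_ definition above) =====
theorem select_vehicle_spec : Claim_equal_select_vehicle := by
  unfold Claim_equal_select_vehicle
  intro vehicles _ hpre
  unfold Spec_select_vehicle select_vehicle select_vehicle_alt
  simp only [foldl_step3, foldl_upd_eq]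
  cases hd : vehicles.filterMap (fun p => if (PySem.Dict.mk p.2).get? "default" == some true then some p.1 else none) with
  | cons x t => simp [pvComb, pvMval, head_sorted_eq_foldl_min]
  | nil =>
    simp only [pvMval, pvComb, List.isEmpty_nil]
    cases ha : vehicles.filterMap (fun p => if (PySem.Dict.mk p.2).get? "active" == some true then some p.1 else none) with
    | cons x t => simp [head_sorted_eq_foldl_min]
    | nil =>
      simp only [List.isEmpty_nil]
      cases hv : vehicles.map (·.1) with
      | nil => exact absurd (List.map_eq_nil_iff.mp hv) hpre
      | cons x t =>
        cases t with
        | nil => simp [hv]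
        | cons y s => simp [hv, head_sorted_eq_foldl_min]
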